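-- pv_equiv track=rewrite | github.com/f-z/algorithms | soldier_ranks.py | solution
-- ===== SOURCE A (Python) =====
-- def solution(ranks):
--     """
--     Getting counts of soldiers in a certain rank n reporting to at least one soldier in rank n + 1 (where n + 1 exists)
--     and returning their total sum across all ranks
--     """
--     counts = {}
--     for i in range(len(ranks)):
--         if ranks[i] in counts:
--             counts[ranks[i]] += 1
--         else:
--             counts[ranks[i]] = 1
--
--     sum = 0
--
--     for key, value in counts.items():
--         if (key + 1) in counts:
--             sum += value
--
--     return sum
-- ===== SOURCE B (Python) =====
-- def solution(ranks):
--     present = set(ranks)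
--     return sum(1 for r in ranks if r + 1 in present)
-- ===== Notes on version B (the rewrite author's own statement) =====
-- stated objective: simpler
-- what changed: Replaces the count-dict build plus a second pass over distinct keys summing stored counts with a one-pass presence set and a direct count over the original list (each element contributes 1 if its rank+1 is present); no per-rank counts are ever aggregated.
import Mathlib
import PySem

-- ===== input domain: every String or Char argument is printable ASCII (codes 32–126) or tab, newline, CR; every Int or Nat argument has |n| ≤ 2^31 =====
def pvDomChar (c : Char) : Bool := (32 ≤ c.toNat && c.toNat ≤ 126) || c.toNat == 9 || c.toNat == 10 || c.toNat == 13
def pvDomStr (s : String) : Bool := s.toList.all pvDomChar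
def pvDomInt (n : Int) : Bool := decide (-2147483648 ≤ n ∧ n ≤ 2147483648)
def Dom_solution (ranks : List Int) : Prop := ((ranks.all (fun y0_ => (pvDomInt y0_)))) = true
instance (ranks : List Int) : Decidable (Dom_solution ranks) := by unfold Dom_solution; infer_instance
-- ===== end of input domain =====

-- B builds a presence set and counts matching elements of the original list in one scan,
-- instead of A's per-rank count dict summed over its distinct keys: simpler, same O(n).

-- ===== PORT A =====
def solution (ranks : List Int) : Int :=
  let counts : PySem.Dict Int Int :=
    (PySem.List.pyRange 0 (PySem.List.len ranks) 1).foldl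
      (fun d i =>
        let r := PySem.List.pyGetD ranks i 0
        if d.contains r then d.insert r (d.getD r 0 + 1) else d.insert r 1)
      PySem.Dict.empty
  counts.items.foldl
    (fun s kv => if counts.contains (kv.1 + 1) then s + kv.2 else s) 0

-- ===== PORT B =====
def solution_alt (ranks : List Int) : Int :=
  let present : PySem.Set Int := PySem.Set.ofList ranks
  ranks.foldl (fun acc r => if PySem.Set.contains present (r + 1) then acc + 1 else acc) 0

-- ===== PRECONDITION & SPEC =====
def Spec_solution (ranks : List Int) (out : Int) : Prop := out = solution_alt ranks
instance (ranks : List Int) (out : Int) : Decidable (Spec_solution ranks out) := by unfold Spec_solution; infer_instance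

-- ===== CLAIM (what is proved, stated in full; the proofs are below) =====
def Claim_equal_solution : Prop := ∀ (ranks : List Int), Dom_solution ranks → Spec_solution ranks (solution ranks)

-- ===== LEMMAS AND PROOFS =====

-- A's counting loop (insert of getD+1, branching on membership) is Counter(ranks).
lemma counts_eq_counter (ranks : List Int) :
    (PySem.List.pyRange 0 (PySem.List.len ranks) 1).foldl
      (fun d i =>
        let r := PySem.List.pyGetD ranks i 0
        if d.contains r then d.insert r (d.getD r 0 + 1) else d.insert r 1)
      PySem.Dict.empty = PySem.Dict.counter ranks := by
  have hstep :
      (fun (d : PySem.Dict Int Int) r =>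
        if d.contains r then d.insert r (d.getD r 0 + 1) else d.insert r 1)
        = fun (d : PySem.Dict Int Int) r => d.insert r (d.getD r 0 + 1) := by
    funext d r
    by_cases h : d.contains r
    · simp [h]
    · simp [h, PySem.Dict.getD_of_not_contains d (0 : Int) (by simpa using h)]
  have hfold := PySem.List.foldl_pyRange_zero_pyGetD ranks 0
      (fun (d : PySem.Dict Int Int) r =>
        if d.contains r then d.insert r (d.getD r 0 + 1) else d.insert r 1)
      PySem.Dict.empty
  simp only at hfold ⊢
  rw [hfold, hstep, PySem.Dict.foldl_insert_getD_add_one_eq_counter]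

-- fold of conditional additions as a sum of a 0/ite map
lemma foldl_if_add (l : List (Int × Int)) (c : Int × Int → Bool) (s : Int) :
    l.foldl (fun s kv => if c kv then s + kv.2 else s) s
      = s + (l.map (fun kv => if c kv then kv.2 else 0)).sum := by
  induction l generalizing s with
  | nil => simp
  | cons a l ih =>
    simp only [List.foldl_cons, List.map_cons, List.sum_cons, ih]
    split <;> ring

-- indicator sum over a nodup list containing a exactly once
lemma sum_indicator (ks : List Int) (p : Int → Bool) (a : Int)
    (hnd : ks.Nodup) (ha : a ∈ ks) :
    (ks.map (fun k => if p k ∧ k = a then (1 : Int) else 0)).sum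
      = if p a then 1 else 0 := by
  induction ks with
  | nil => cases ha
  | cons b ks ih =>
    rcases List.mem_cons.mp ha with h | h
    · subst h
      have : (ks.map (fun k => if p k ∧ k = a then (1 : Int) else 0)).sum = 0 := by
        apply List.sum_eq_zero
        intro x hx
        rcases List.mem_map.mp hx with ⟨k, hk, rfl⟩
        have : k ≠ a := fun e => (List.nodup_cons.mp hnd).1 (e ▸ hk)
        simp [this]
      simp only [List.map_cons, List.sum_cons, this, add_zero]
      split <;> simp_all
    · have hb : b ≠ a := fun e => (List.nodup_cons.mp hnd).1 (e ▸ h)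
      have := ih (List.nodup_cons.mp hnd).2 h
      simp [hb, this]

-- sum of counts over a superset key list equals countP over the list
lemma sum_counts (ks : List Int) (p : Int → Bool) (hnd : ks.Nodup) :
    ∀ (l : List Int), (∀ x ∈ l, x ∈ ks) →
      (ks.map (fun k => if p k then (l.count k : Int) else 0)).sum
        = (l.countP p : Int) := by
  intro l
  induction l with
  | nil =>
    intro _
    simp only [List.count_nil, List.countP_nil, Nat.cast_zero]
    apply List.sum_eq_zero
    intro x hx
    rcases List.mem_map.mp hx with ⟨k, _, rfl⟩
    simp
  | cons a l ih =>
    intro hsub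
    have ha : a ∈ ks := hsub a (List.mem_cons_self ..)
    have hl : ∀ x ∈ l, x ∈ ks := fun x hx => hsub x (List.mem_cons_of_mem _ hx)
    have hcount : ∀ k, ((a :: l).count k : Int)
        = (l.count k : Int) + (if k = a then 1 else 0) := by
      intro k
      by_cases h : k = a
      · subst h; simp

      · have h' : ¬ a = k := fun e => h (Eq.symm e)
        simp [h, h']
    have hsplit :
        (ks.map (fun k => if p k then ((a :: l).count k : Int) else 0)).sum
          = (ks.map (fun k => if p k then (l.count k : Int) else 0)).sum
            + (ks.map (fun k => if p k ∧ k = a then (1 : Int) else 0)).sum := by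
      rw [← List.sum_map_add]
      congr 1
      apply List.map_congr_left
      intro k _
      by_cases hk : k = a
      · subst hk; by_cases hp : p k <;> simp [hp]
      · simp [hk, hcount k]
    rw [hsplit, ih hl, sum_indicator ks p a hnd ha, List.countP_cons]
    by_cases hp : p a <;> simp [hp]

-- ===== VERDICT (by name: the statement is the Claim_ definition above) =====
theorem solution_spec : Claim_equal_solution := by
  intro ranks _
  unfold Spec_solution solution solution_alt
  simp only [counts_eq_counter ranks]
  rw [foldl_if_add, PySem.List.foldl_if_add_one, PySem.Dict.items_counter, List.map_map]
  simp only [zero_add, Function.comp_def]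
  have hpred : ∀ k : Int,
      (PySem.Dict.counter ranks).contains (k + 1)
        = PySem.Set.contains (PySem.Set.ofList ranks) (k + 1) := by
    intro k
    rw [PySem.Dict.contains_counter]
    by_cases h : (k + 1) ∈ ranks <;> simp [h]
  have hmap : (PySem.Set.ofList ranks).map
        (fun k => if (PySem.Dict.counter ranks).contains (k + 1) then (ranks.count k : Int) else 0)
      = (PySem.Set.ofList ranks).map
        (fun k => if PySem.Set.contains (PySem.Set.ofList ranks) (k + 1) then (ranks.count k : Int) else 0) := by
    apply List.map_congr_left
    intro k _
    rw [hpred k]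
  rw [hmap]
  exact sum_counts (PySem.Set.ofList ranks)
    (fun k => PySem.Set.contains (PySem.Set.ofList ranks) (k + 1))
    (PySem.Set.nodup_ofList ranks) ranks
    (fun x hx => (PySem.Set.mem_ofList ranks x).mpr hx)
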